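-- pv_equiv track=rewrite | github.com/honey-lee/Algorithm---Programmers | Python - Level2/카펫/카펫.py | solution
-- ===== SOURCE A (Python) =====
-- def solution(brown, yellow):
--     result = []
--     hap = brown + yellow
--     div = []
--     for i in range(1, hap):
--         if not hap % i:
--             div.append(i)
--
--     result.append(div[len(div)//2])
--
--     if len(div) > len(div)//2 + 1:
--         result.append(div[len(div)//2 + 1])
--     else:
--         result.append(div[len(div) // 2])
--
--     result.sort(reverse=True)
--
--     return result
-- ===== SOURCE B (Python) =====
-- def solution(brown, yellow):
--     hap = brown + yellow
--     small = []
--     large = []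
--     i = 1
--     while i * i <= hap:
--         if hap % i == 0:
--             small.append(i)
--             j = hap // i
--             if j != i:
--                 large.append(j)
--         i += 1
--     div = small + large[::-1]
--     div.pop()  # drop hap itself (the largest divisor); A only keeps divisors < hap
--     m = len(div) // 2
--     a = div[m]
--     b = div[m + 1] if m + 1 < len(div) else a
--     return [b, a] if b >= a else [a, b]
-- ===== Notes on version B (the rewrite author's own statement) =====
-- stated objective: faster
-- what changed: Instead of scanning every i in range(1, brown+yellow) for divisors, B trial-divides only up to sqrt(brown+yellow), collecting each small divisor and its cofactor, assembles the sorted divisor list from the two halves, drops the number itself, and picks the same middle pair.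
import Mathlib
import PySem

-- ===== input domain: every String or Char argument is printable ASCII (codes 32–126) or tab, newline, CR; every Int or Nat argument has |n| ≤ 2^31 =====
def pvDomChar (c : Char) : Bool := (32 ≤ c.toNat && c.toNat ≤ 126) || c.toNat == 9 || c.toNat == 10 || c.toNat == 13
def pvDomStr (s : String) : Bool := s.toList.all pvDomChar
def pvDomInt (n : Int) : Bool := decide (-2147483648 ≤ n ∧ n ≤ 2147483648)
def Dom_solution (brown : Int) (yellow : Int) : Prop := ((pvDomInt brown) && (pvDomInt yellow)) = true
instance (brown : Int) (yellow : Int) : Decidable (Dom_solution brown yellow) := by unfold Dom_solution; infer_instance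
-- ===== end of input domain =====

-- B replaces A's scan of every i in range(1, brown+yellow) by trial division up to sqrt(brown+yellow).

-- ===== PORT A =====
def solution (brown : Int) (yellow : Int) : List Int :=
  let hap := brown + yellow
  let div := (PySem.List.pyRange 1 hap).foldl
      (fun acc i => if PySem.Int.mod hap i == 0 then acc ++ [i] else acc) []
  let m : Int := PySem.Int.floordiv (div.length : Int) 2
  match PySem.List.pyGet? div m with
  | none => []  -- div[len(div)//2] raises IndexError (div empty); excluded by Pre_
  | some a =>
    let result :=
      if (div.length : Int) > m + 1 then
        [a] ++ [(PySem.List.pyGet? div (m + 1)).getD 0]  -- index m+1 is in range under the branch guard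
      else [a] ++ [a]
    PySem.List.sorted result (fun x => x) true

-- ===== PORT B =====
-- the 'while i * i <= hap' loop of Source B; the fuel argument (hap.toNat + 1) only makes it total
def collectDivs (hap : Int) : Nat → Int → List Int → List Int → List Int × List Int
  | 0, _, small, large => (small, large)
  | n + 1, i, small, large =>
    if i * i ≤ hap then
      if PySem.Int.mod hap i == 0 then
        collectDivs hap n (i + 1) (small ++ [i])
          (if PySem.Int.floordiv hap i ≠ i then large ++ [PySem.Int.floordiv hap i] else large)
      else collectDivs hap n (i + 1) small large
    else (small, large)

def solution_alt (brown : Int) (yellow : Int) : List Int :=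
  let hap := brown + yellow
  let sl := collectDivs hap (hap.toNat + 1) 1 [] []
  let div0 := sl.1 ++ sl.2.reverse
  match PySem.List.pop? div0 with
  | none => []  -- div.pop() raises IndexError (empty list); excluded by Pre_
  | some r =>
    let div := r.2
    let m : Int := PySem.Int.floordiv (div.length : Int) 2
    match PySem.List.pyGet? div m with
    | none => []  -- div[m] raises IndexError; excluded by Pre_
    | some a =>
      let b := if m + 1 < (div.length : Int) then (PySem.List.pyGet? div (m + 1)).getD 0 else a
      if b ≥ a then [b, a] else [a, b]

-- ===== PRECONDITION & SPEC =====
-- A raises IndexError whenever brown+yellow ≤ 1 (div stays empty); exactly those inputs are excluded.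
def Pre_solution (brown : Int) (yellow : Int) : Prop := 2 ≤ brown + yellow
instance (brown : Int) (yellow : Int) : Decidable (Pre_solution brown yellow) := by unfold Pre_solution; infer_instance
def pvWitness_solution : Int × Int := (10, 2)

def Spec_solution (brown : Int) (yellow : Int) (out : List Int) : Prop := out = solution_alt brown yellow
instance (brown : Int) (yellow : Int) (out : List Int) : Decidable (Spec_solution brown yellow out) := by unfold Spec_solution; infer_instance

-- ===== CLAIM (what is proved, stated in full; the proofs are below) =====
def Claim_equal_solution : Prop := ∀ (brown : Int) (yellow : Int), Dom_solution brown yellow → Pre_solution brown yellow → Spec_solution brown yellow (solution brown yellow)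

-- ===== LEMMAS AND PROOFS =====

-- A's divisor list: every i in [1, hap) with hap % i == 0
def divsA (hap : Int) : List Int :=
  (PySem.List.pyRange 1 hap).filter (fun i => PySem.Int.mod hap i == 0)

-- B's two halves in closed form
def smallB (hap a b : Int) : List Int :=
  (PySem.List.pyRange a b).filter (fun i => PySem.Int.mod hap i == 0)

def largeB (hap a b : Int) : List Int :=
  ((PySem.List.pyRange a b).filter
      (fun i => PySem.Int.mod hap i == 0 && decide (PySem.Int.floordiv hap i ≠ i))).map
    (fun i => PySem.Int.floordiv hap i)

lemma sq_le_iff_le_sqrt (hap i : Int) (h0 : 0 ≤ hap) (h1 : 1 ≤ i) :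
    i * i ≤ hap ↔ i ≤ (hap.toNat.sqrt : Int) := by
  have hi : ((i.toNat : Int)) = i := Int.toNat_of_nonneg (by omega)
  have hcast : ((hap.toNat : Nat) : Int) = hap := Int.toNat_of_nonneg h0
  constructor
  · intro h
    have hnat : i.toNat * i.toNat ≤ hap.toNat := by
      have : ((i.toNat * i.toNat : Nat) : Int) ≤ ((hap.toNat : Nat) : Int) := by
        push_cast
        rw [hi]
        exact h.trans_eq hcast.symm
      exact_mod_cast this
    have := Nat.le_sqrt.mpr hnat
    omega
  · intro h
    have hle : i.toNat ≤ hap.toNat.sqrt := by omega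
    have hnat : i.toNat * i.toNat ≤ hap.toNat := Nat.le_sqrt.mp hle
    have h' : ((i.toNat * i.toNat : Nat) : Int) ≤ ((hap.toNat : Nat) : Int) := by exact_mod_cast hnat
    push_cast at h'
    rw [hi, hcast] at h'
    exact h'

lemma collectDivs_eq (hap : Int) (h2 : 2 ≤ hap) :
    ∀ (n : Nat) (i : Int), 1 ≤ i → hap + 1 ≤ i + n → ∀ (small large : List Int),
      collectDivs hap n i small large =
        (small ++ smallB hap i ((hap.toNat.sqrt : Int) + 1),
         large ++ largeB hap i ((hap.toNat.sqrt : Int) + 1)) := by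
  intro n
  induction n with
  | zero =>
    intro i h1 hbound small large
    have hr : (hap.toNat.sqrt : Int) + 1 ≤ i := by
      have := Nat.sqrt_le_self hap.toNat
      omega
    simp [collectDivs, smallB, largeB, PySem.List.pyRange_one_eq_nil hr]
  | succ n ih =>
    intro i h1 hbound small large
    by_cases hlt : i * i ≤ hap
    · have hiLt : i < (hap.toNat.sqrt : Int) + 1 := by
        have := (sq_le_iff_le_sqrt hap i (by omega) h1).mp hlt
        omega
      have hcons := PySem.List.pyRange_one_cons hiLt
      have ihx := ih (i + 1) (by omega) (by omega)
      by_cases hp : PySem.Int.mod hap i = 0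
      · by_cases hj : PySem.Int.floordiv hap i = i
        · simp only [collectDivs, if_pos hlt, hp, beq_self_eq_true, if_true, hj, ne_eq,
            not_true_eq_false, if_false, ihx]
          simp [smallB, largeB, hcons, hp, hj]
        · simp only [collectDivs, if_pos hlt, hp, beq_self_eq_true, if_true, ne_eq, hj,
            not_false_eq_true, if_true, ihx]
          simp [smallB, largeB, hcons, hp, hj]
      · have hpb : (PySem.Int.mod hap i == 0) = false := by simp [hp]
        simp only [collectDivs, if_pos hlt, hpb, Bool.false_eq_true, if_false, ihx]
        simp [smallB, largeB, hcons, hpb]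
    · have hr : (hap.toNat.sqrt : Int) + 1 ≤ i := by
        by_contra hcon
        push_neg at hcon
        exact hlt ((sq_le_iff_le_sqrt hap i (by omega) h1).mpr (by omega))
      simp [collectDivs, hlt, smallB, largeB, PySem.List.pyRange_one_eq_nil hr]

lemma div_strict_anti (hap a b : Int) (hhap : 2 ≤ hap) (h1 : 1 ≤ a) (hab : a < b)
    (ha : a ∣ hap) (hb : b ∣ hap) : hap / b < hap / a := by
  obtain ⟨ca, hca⟩ := ha
  obtain ⟨cb, hcb⟩ := hb
  have ha' : hap / a = ca := by rw [hca, Int.mul_ediv_cancel_left _ (by omega)]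
  have hb' : hap / b = cb := by rw [hcb, Int.mul_ediv_cancel_left _ (by omega)]
  rw [ha', hb']
  have hca1 : 1 ≤ ca := by nlinarith
  by_contra hcon
  push_neg at hcon
  have h3 : a * ca < b * ca := by
    have := mul_lt_mul_of_pos_right hab (show (0:ℤ) < ca by omega)
    linarith
  have h4 : b * ca ≤ b * cb := mul_le_mul_of_nonneg_left hcon (by omega)
  linarith [hca, hcb]

-- B's assembled list is A's divisor list with hap appended
lemma bdiv_eq (hap : Int) (h2 : 2 ≤ hap) :
    smallB hap 1 ((hap.toNat.sqrt : Int) + 1) ++ (largeB hap 1 ((hap.toNat.sqrt : Int) + 1)).reverse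
      = divsA hap ++ [hap] := by
  set r : Int := (hap.toNat.sqrt : Int) with hrdef
  have hr1 : 1 ≤ r := by
    have := (sq_le_iff_le_sqrt hap 1 (by omega) le_rfl).mp (by omega)
    omega
  have hrle : r ≤ hap := by
    have := Nat.sqrt_le_self hap.toNat
    omega
  -- membership characterizations
  have hmemS : ∀ x, x ∈ smallB hap 1 (r + 1) ↔ (1 ≤ x ∧ x ≤ r) ∧ x ∣ hap := by
    intro x
    simp [smallB, List.mem_filter, PySem.List.mem_pyRange_one,
      PySem.Int.mod_eq_zero_iff_dvd]
  have hmemL : ∀ x, x ∈ largeB hap 1 (r + 1) ↔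
      ∃ d, (1 ≤ d ∧ d ≤ r) ∧ (d ∣ hap ∧ hap / d ≠ d) ∧ hap / d = x := by
    intro x
    simp only [largeB, List.mem_map, List.mem_filter, PySem.List.mem_pyRange_one,
      Bool.and_eq_true, decide_eq_true_eq, beq_iff_eq, PySem.Int.mod_eq_zero_iff_dvd, Int.lt_add_one_iff]
    constructor
    · rintro ⟨d, ⟨⟨hd1, hdr⟩, hdvd, hne⟩, hx⟩
      have hfd : PySem.Int.floordiv hap d = hap / d := PySem.Int.floordiv_eq_ediv_of_pos (by omega)
      rw [hfd] at hne hx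
      exact ⟨d, ⟨hd1, hdr⟩, ⟨hdvd, hne⟩, hx⟩
    · rintro ⟨d, ⟨hd1, hdr⟩, ⟨hdvd, hne⟩, hx⟩
      have hfd : PySem.Int.floordiv hap d = hap / d := PySem.Int.floordiv_eq_ediv_of_pos (by omega)
      exact ⟨d, ⟨⟨hd1, hdr⟩, hdvd, by rw [hfd]; exact hne⟩, by rw [hfd]; exact hx⟩
  have hmemA : ∀ x, x ∈ divsA hap ↔ (1 ≤ x ∧ x < hap) ∧ x ∣ hap := by
    intro x
    simp [divsA, List.mem_filter, PySem.List.mem_pyRange_one, PySem.Int.mod_eq_zero_iff_dvd]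
  -- facts about large elements
  have hlarge_facts : ∀ x, x ∈ largeB hap 1 (r + 1) → x ∣ hap ∧ 1 ≤ x ∧ x ≤ hap ∧ hap < x * x := by
    intro x hx
    obtain ⟨d, ⟨hd1, hdr⟩, ⟨hdvd, hne⟩, hx⟩ := (hmemL x).mp hx
    obtain ⟨c, hc⟩ := hdvd
    have hcd : hap / d = c := by rw [hc, Int.mul_ediv_cancel_left _ (by omega)]
    have hxc : x = c := by omega
    subst hxc
    rw [hcd] at hne
    have hc1 : 1 ≤ x := by nlinarith
    have hdx : d ≤ x := by
      by_contra hcon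
      push_neg at hcon
      have hdd : d * d ≤ hap := (sq_le_iff_le_sqrt hap d (by omega) hd1).mpr hdr
      nlinarith
    have hdx' : d < x := lt_of_le_of_ne hdx (by omega)
    exact ⟨⟨d, by rw [hc]; ring⟩, hc1, by nlinarith, by nlinarith⟩
  have hsmall_facts : ∀ x, x ∈ smallB hap 1 (r + 1) → x ∣ hap ∧ 1 ≤ x ∧ x * x ≤ hap := by
    intro x hx
    obtain ⟨⟨h1, h2'⟩, hd⟩ := (hmemS x).mp hx
    exact ⟨hd, h1, (sq_le_iff_le_sqrt hap x (by omega) h1).mpr h2'⟩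
  -- pairwise (strict increase) of both sides
  have hpS : (smallB hap 1 (r + 1)).Pairwise (· < ·) :=
    (PySem.List.pairwise_lt_pyRange_one 1 (r + 1)).filter _
  have hpL : (largeB hap 1 (r + 1)).Pairwise (fun a b => b < a) := by
    unfold largeB
    rw [List.pairwise_map]
    refine List.Pairwise.imp_of_mem ?_ ((PySem.List.pairwise_lt_pyRange_one 1 (r + 1)).filter _)
    intro a b ha hb hab
    rw [List.mem_filter] at ha hb
    obtain ⟨ha1, ha2⟩ := ha
    obtain ⟨hb1, hb2⟩ := hb
    rw [PySem.List.mem_pyRange_one] at ha1 hb1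
    simp only [Bool.and_eq_true, beq_iff_eq, PySem.Int.mod_eq_zero_iff_dvd] at ha2 hb2
    have hfa : PySem.Int.floordiv hap a = hap / a :=
      PySem.Int.floordiv_eq_ediv_of_pos (by omega)
    have hfb : PySem.Int.floordiv hap b = hap / b :=
      PySem.Int.floordiv_eq_ediv_of_pos (by omega)
    rw [hfa, hfb]
    exact div_strict_anti hap a b h2 (by omega) hab ha2.1 hb2.1
  have hpLrev : (largeB hap 1 (r + 1)).reverse.Pairwise (· < ·) :=
    List.pairwise_reverse.mpr hpL
  have hcross : ∀ s ∈ smallB hap 1 (r + 1), ∀ e ∈ (largeB hap 1 (r + 1)).reverse, s < e := by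
    intro s hs e he
    rw [List.mem_reverse] at he
    obtain ⟨_, hs1, hs2⟩ := hsmall_facts s hs
    obtain ⟨_, he1, _, he2⟩ := hlarge_facts e he
    nlinarith
  have hpLHS : (smallB hap 1 (r + 1) ++ (largeB hap 1 (r + 1)).reverse).Pairwise (· < ·) :=
    List.pairwise_append.mpr ⟨hpS, hpLrev, hcross⟩
  have hpA : (divsA hap).Pairwise (· < ·) :=
    (PySem.List.pairwise_lt_pyRange_one 1 hap).filter _
  have hpRHS : (divsA hap ++ [hap]).Pairwise (· < ·) := by
    refine List.pairwise_append.mpr ⟨hpA, List.pairwise_singleton _ _, ?_⟩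
    intro x hx y hy
    rw [List.mem_singleton] at hy
    subst hy
    exact ((hmemA x).mp hx).1.2
  -- same members
  have hmem : ∀ x, x ∈ smallB hap 1 (r + 1) ++ (largeB hap 1 (r + 1)).reverse ↔
      x ∈ divsA hap ++ [hap] := by
    intro x
    rw [List.mem_append, List.mem_append, List.mem_reverse, List.mem_singleton]
    constructor
    · rintro (hx | hx)
      · obtain ⟨hd, h1, _⟩ := hsmall_facts x hx
        have hxle : x ≤ hap := Int.le_of_dvd (by omega) hd
        rcases eq_or_lt_of_le hxle with h | h
        · exact Or.inr h
        · exact Or.inl ((hmemA x).mpr ⟨⟨h1, h⟩, hd⟩)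
      · obtain ⟨hd, h1, hxle, _⟩ := hlarge_facts x hx
        rcases eq_or_lt_of_le hxle with h | h
        · exact Or.inr h
        · exact Or.inl ((hmemA x).mpr ⟨⟨h1, h⟩, hd⟩)
    · rintro (hx | rfl)
      · obtain ⟨⟨h1, hlt⟩, hd⟩ := (hmemA x).mp hx
        by_cases hxr : x ≤ r
        · exact Or.inl ((hmemS x).mpr ⟨⟨h1, hxr⟩, hd⟩)
        · refine Or.inr ((hmemL x).mpr ?_)
          obtain ⟨c, hc⟩ := hd
          have hc0 : 1 ≤ c := by nlinarith
          have hxx : hap < x * x := by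
            by_contra hcon
            push_neg at hcon
            exact hxr ((sq_le_iff_le_sqrt hap x (by omega) h1).mp hcon)
          have hcx : c < x := by nlinarith
          have hcc : c * c ≤ hap := by nlinarith
          have hcr : c ≤ r := (sq_le_iff_le_sqrt hap c (by omega) hc0).mp hcc
          have hdivc : hap / c = x := by
            rw [hc, mul_comm, Int.mul_ediv_cancel_left _ (by omega)]
          exact ⟨c, ⟨hc0, hcr⟩, ⟨⟨x, by rw [hc]; ring⟩, by omega⟩, hdivc⟩
      · refine Or.inr ((hmemL _).mpr ?_)
        exact ⟨1, ⟨le_rfl, hr1⟩, ⟨one_dvd _, by rw [Int.ediv_one]; omega⟩, by rw [Int.ediv_one]⟩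
  -- strictly sorted lists with equal members are equal
  have nd1 : (smallB hap 1 (r + 1) ++ (largeB hap 1 (r + 1)).reverse).Nodup :=
    hpLHS.imp (fun h => ne_of_lt h)
  have nd2 : (divsA hap ++ [hap]).Nodup := hpRHS.imp (fun h => ne_of_lt h)
  exact List.eq_of_perm_of_sorted (fun a b _ _ h1' h2' => by omega) hpLHS hpRHS
    ((List.perm_ext_iff_of_nodup nd1 nd2).mpr hmem)

-- two-element reverse sort
lemma sorted_pair (a x : Int) :
    PySem.List.sorted [a, x] (fun y => y) true = if a ≤ x then [x, a] else [a, x] := by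
  rcases lt_trichotomy a x with h | h | h
  · rw [if_pos h.le]
    exact PySem.List.sorted_rev_eq_of_perm_of_pairwise_gt [a, x] [x, a] (fun y => y)
      (List.Perm.swap a x []) (by simp [h])
  · subst h
    rw [if_pos le_rfl]
    exact PySem.List.sorted_rev_eq_self_of_pairwise [a, a] (fun y => y) (by simp)
  · rw [if_neg (not_le.mpr h)]
    exact PySem.List.sorted_rev_eq_self_of_pairwise [a, x] (fun y => y) (by simp [h.le])

-- ===== VERDICT (by name: the statement is the Claim_ definition above) =====
lemma one_mem_divsA (hap : Int) (h2 : 2 ≤ hap) : (1 : Int) ∈ divsA hap := by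
  simp only [divsA, List.mem_filter, PySem.List.mem_pyRange_one, beq_iff_eq,
    PySem.Int.mod_eq_zero_iff_dvd]
  exact ⟨⟨le_rfl, by omega⟩, one_dvd _⟩

theorem solution_spec : Claim_equal_solution := by
  intro brown yellow _ hpre
  have h2 : 2 ≤ brown + yellow := hpre
  show solution brown yellow = solution_alt brown yellow
  simp only [solution, solution_alt]
  set hap := brown + yellow with hhap
  rw [PySem.List.foldl_append_if_eq_filter (fun i => PySem.Int.mod hap i == 0)]
  rw [collectDivs_eq hap h2 (hap.toNat + 1) 1 (by omega) (by omega) [] []]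
  simp only [List.nil_append]
  rw [bdiv_eq hap h2, PySem.List.pop?_last]
  have hD : ((PySem.List.pyRange 1 hap).filter (fun i => PySem.Int.mod hap i == 0)) = divsA hap := rfl
  rw [hD]
  have hne : (1 : Int) ∈ divsA hap := one_mem_divsA hap h2
  have hlen : 1 ≤ (divsA hap).length := List.length_pos_of_mem hne
  set D := divsA hap with hDdef
  set m : Int := PySem.Int.floordiv ((D.length : Nat) : Int) 2 with hmdef
  have hm : m = ((D.length : Nat) : Int) / 2 := PySem.Int.floordiv_eq_ediv_of_pos (by omega)
  have hm0 : 0 ≤ m := by omega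
  have hmlt : m < (D.length : Int) := by omega
  dsimp only
  simp only [← hmdef]
  have hget : PySem.List.pyGet? D m = some (D[m.toNat]'(by omega)) := by
    exact PySem.List.pyGet?_eq_some_getElem D hm0 hmlt
  simp only [hget]
  simp only [gt_iff_lt, ge_iff_le]
  by_cases hc : m + 1 < ((D.length : Nat) : Int)
  · have hget2 : PySem.List.pyGet? D (m + 1) = some (D[(m + 1).toNat]'(by omega)) := by
      exact PySem.List.pyGet?_eq_some_getElem D (by omega) hc
    simp only [if_pos hc, hget2, Option.getD_some, List.singleton_append]
    rw [sorted_pair]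
  · simp only [if_neg hc, List.singleton_append]
    rw [sorted_pair]
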